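-- pv_equiv track=rewrite | github.com/pypi-data/pypi-mirror-359 | packages/dialup/dialup-1.0.0.tar.gz/dialup-1.0.0/src/dialup/denoisers/utils/flores_code_to_langname.py | flores_code_to_hrln
-- ===== SOURCE A (Python) =====
-- def flores_code_to_langname(code):
--     iso3_to_lang = {
--         "hne_Deva": "Chhattisgarhi",
--         "bho_Deva": "Bhojpuri",
--         "mag_Deva": "Magahi",
--         "mai_Deva": "Maithili",
--         "hin_Deva": "Hindi",
--         "tur_Latn": "Turkish",
--         "uzn_Latn": "Uzbek",
--         "tuk_Latn": "Turkmen",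
--         "azj_Latn": "Azerbaijani",
--         "crh_Latn": "Crimean Tatar",
--         "spa_Latn": "Spanish",
--         "fra_Latn": "French",
--         "por_Latn": "Portuguese",
--         "ita_Latn": "Italian",
--         "ron_Latn": "Romanian",
--         "glg_Latn": "Galician",
--         "cat_Latn": "Catalan",
--         "oci_Latn": "Occitan",
--         "ast_Latn": "Asturian",
--         "lmo_Latn": "Lombard",
--         "vec_Latn": "Venetian",
--         "scn_Latn": "Sicilian",
--         "srd_Latn": "Sardinian",
--         "fur_Latn": "Friulian",
--         "lij_Latn": "Ligurian",
--         "ind_Latn": "Indonesian",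
--         "jav_Latn": "Javanese",
--         "sun_Latn": "Sundanese",
--         "smo_Latn": "Samoan",
--         "mri_Latn": "Maori",
--         "ceb_Latn": "Cebuano",
--         "zsm_Latn": "Malay",
--         "tgl_Latn": "Tagalog",
--         "ilo_Latn": "Ilokano",
--         "fij_Latn": "Fijian",
--         "plt_Latn": "Plateau Malagasy",
--         "pag_Latn": "Pangasinan",
--         "arb_Arab": "Arabic",
--         "acm_Arab": "Iraqi Arabic",
--         "acq_Arab": "Ta'izzi-Adeni Arabic",
--         "aeb_Arab": "Tunisian Arabic",
--         "ajp_Arab": "South Levantine Arabic",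
--         "apc_Arab": "North Levantine Arabic",
--         "ars_Arab": "Najdi Arabic",
--         "ary_Arab": "Moroccan Arabic",
--         "arz_Arab": "Egyptian Arabic"
--     }
--     return iso3_to_lang[code]
--
-- def flores_code_to_hrln(code):
--     hrln2crls = {
--         "hin_Deva": ["hne_Deva", "bho_Deva", "mag_Deva", "mai_Deva", "hin_Deva"],
--         "tur_Latn": ["tur_Latn", "uzn_Latn", "tuk_Latn", "azj_Latn", "crh_Latn"],
--         "ita_Latn": ["spa_Latn", "fra_Latn", "por_Latn", "ita_Latn", "ron_Latn", "glg_Latn", "cat_Latn", "oci_Latn", "ast_Latn", "lmo_Latn", "vec_Latn", "scn_Latn", "srd_Latn", "fur_Latn", "lij_Latn"],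
--         "ind_Latn": ["ind_Latn", "jav_Latn", "sun_Latn", "smo_Latn", "mri_Latn", "ceb_Latn", "zsm_Latn", "tgl_Latn", "ilo_Latn", "fij_Latn", "plt_Latn", "pag_Latn"],
--         "arb_Arab": ["arb_Arab", "acm_Arab", "acq_Arab", "aeb_Arab", "ajp_Arab", "apc_Arab", "ars_Arab", "ary_Arab", "arz_Arab", \
--                      "cai", "dam", "doh", "fes", "jer", "kha", "msa", "riy", "san", "tri", "tun"] # FloRes codes, MADAR codes
--         }
--
--     for hrln, crls in hrln2crls.items():
--         if code in crls:
--             return hrln, flores_code_to_langname(hrln)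
-- ===== SOURCE B (Python) =====
-- _HRLN2CRLS = {
--     "hin_Deva": ["hne_Deva", "bho_Deva", "mag_Deva", "mai_Deva", "hin_Deva"],
--     "tur_Latn": ["tur_Latn", "uzn_Latn", "tuk_Latn", "azj_Latn", "crh_Latn"],
--     "ita_Latn": ["spa_Latn", "fra_Latn", "por_Latn", "ita_Latn", "ron_Latn", "glg_Latn", "cat_Latn", "oci_Latn", "ast_Latn", "lmo_Latn", "vec_Latn", "scn_Latn", "srd_Latn", "fur_Latn", "lij_Latn"],
--     "ind_Latn": ["ind_Latn", "jav_Latn", "sun_Latn", "smo_Latn", "mri_Latn", "ceb_Latn", "zsm_Latn", "tgl_Latn", "ilo_Latn", "fij_Latn", "plt_Latn", "pag_Latn"],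
--     "arb_Arab": ["arb_Arab", "acm_Arab", "acq_Arab", "aeb_Arab", "ajp_Arab", "apc_Arab", "ars_Arab", "ary_Arab", "arz_Arab",
--                  "cai", "dam", "doh", "fes", "jer", "kha", "msa", "riy", "san", "tri", "tun"],
-- }
--
-- _HRLN_NAME = {
--     "hin_Deva": "Hindi",
--     "tur_Latn": "Turkish",
--     "ita_Latn": "Italian",
--     "ind_Latn": "Indonesian",
--     "arb_Arab": "Arabic",
-- }
--
-- # precomputed reverse index: each code (flores or MADAR) -> its high-resource group key
-- _CODE2HRLN = {c: h for h, crls in _HRLN2CRLS.items() for c in crls}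
--
--
-- def flores_code_to_hrln(code):
--     hrln = _CODE2HRLN.get(code)
--     if hrln is None:
--         return None
--     return hrln, _HRLN_NAME[hrln]
-- ===== Notes on version B (the rewrite author's own statement) =====
-- stated objective: simpler
-- what changed: A scans the five group lists on every call; B precomputes once a flat reverse-index dict mapping each flores/MADAR code to its group key and the body becomes a single dict lookup (None on miss, matching A's fall-through).
import Mathlib
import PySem

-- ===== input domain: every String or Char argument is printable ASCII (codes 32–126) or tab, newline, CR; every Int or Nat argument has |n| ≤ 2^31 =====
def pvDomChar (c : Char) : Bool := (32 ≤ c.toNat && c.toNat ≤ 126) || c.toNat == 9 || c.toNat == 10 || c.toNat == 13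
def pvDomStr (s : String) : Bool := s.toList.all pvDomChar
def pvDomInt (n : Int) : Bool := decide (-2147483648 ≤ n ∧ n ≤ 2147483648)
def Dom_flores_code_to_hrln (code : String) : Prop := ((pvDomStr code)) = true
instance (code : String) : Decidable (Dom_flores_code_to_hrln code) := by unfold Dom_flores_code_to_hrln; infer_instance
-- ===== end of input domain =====

-- B replaces A's scan over the five group lists by one lookup in a reverse index (code -> group key) precomputed from the same table; objective: simpler.

-- ===== PORT A =====
-- iso3_to_lang of flores_code_to_langname; A only indexes it at the five group keys, which are always present,
-- so the helper is ported Option-valued (none would be Python's KeyError, never reached by A)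
def pvIso3ToLang : PySem.Dict String String := PySem.Dict.ofList [("hne_Deva", "Chhattisgarhi"), ("bho_Deva", "Bhojpuri"), ("mag_Deva", "Magahi"), ("mai_Deva", "Maithili"), ("hin_Deva", "Hindi"), ("tur_Latn", "Turkish"), ("uzn_Latn", "Uzbek"), ("tuk_Latn", "Turkmen"), ("azj_Latn", "Azerbaijani"), ("crh_Latn", "Crimean Tatar"), ("spa_Latn", "Spanish"), ("fra_Latn", "French"), ("por_Latn", "Portuguese"), ("ita_Latn", "Italian"), ("ron_Latn", "Romanian"), ("glg_Latn", "Galician"), ("cat_Latn", "Catalan"), ("oci_Latn", "Occitan"), ("ast_Latn", "Asturian"), ("lmo_Latn", "Lombard"), ("vec_Latn", "Venetian"), ("scn_Latn", "Sicilian"), ("srd_Latn", "Sardinian"), ("fur_Latn", "Friulian"), ("lij_Latn", "Ligurian"), ("ind_Latn", "Indonesian"), ("jav_Latn", "Javanese"), ("sun_Latn", "Sundanese"), ("smo_Latn", "Samoan"), ("mri_Latn", "Maori"), ("ceb_Latn", "Cebuano"), ("zsm_Latn", "Malay"), ("tgl_Latn", "Tagalog"), ("ilo_Latn", "Ilokano"),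 ("fij_Latn", "Fijian"), ("plt_Latn", "Plateau Malagasy"), ("pag_Latn", "Pangasinan"), ("arb_Arab", "Arabic"), ("acm_Arab", "Iraqi Arabic"), ("acq_Arab", "Ta'izzi-Adeni Arabic"), ("aeb_Arab", "Tunisian Arabic"), ("ajp_Arab", "South Levantine Arabic"), ("apc_Arab", "North Levantine Arabic"), ("ars_Arab", "Najdi Arabic"), ("ary_Arab", "Moroccan Arabic"), ("arz_Arab", "Egyptian Arabic")]

def pvFloresCodeToLangname (c : String) : Option String := pvIso3ToLang.get? c

-- hrln2crls as its items list, in insertion order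
def pvHrln2Crls : List (String × List String) :=
  [("hin_Deva", ["hne_Deva", "bho_Deva", "mag_Deva", "mai_Deva", "hin_Deva"]),
   ("tur_Latn", ["tur_Latn", "uzn_Latn", "tuk_Latn", "azj_Latn", "crh_Latn"]),
   ("ita_Latn", ["spa_Latn", "fra_Latn", "por_Latn", "ita_Latn", "ron_Latn", "glg_Latn", "cat_Latn", "oci_Latn", "ast_Latn", "lmo_Latn", "vec_Latn", "scn_Latn", "srd_Latn", "fur_Latn", "lij_Latn"]),
   ("ind_Latn", ["ind_Latn", "jav_Latn", "sun_Latn", "smo_Latn", "mri_Latn", "ceb_Latn", "zsm_Latn", "tgl_Latn", "ilo_Latn", "fij_Latn", "plt_Latn", "pag_Latn"]),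
   ("arb_Arab", ["arb_Arab", "acm_Arab", "acq_Arab", "aeb_Arab", "ajp_Arab", "apc_Arab", "ars_Arab", "ary_Arab", "arz_Arab", "cai", "dam", "doh", "fes", "jer", "kha", "msa", "riy", "san", "tri", "tun"])]

-- the for-loop of A: first group whose code list contains `code`; falling off the loop is Python's implicit None
def pvLoopA : List (String × List String) → String → Option (String × String)
  | [], _ => none
  | (hrln, crls) :: rest, code =>
    if crls.contains code then (pvFloresCodeToLangname hrln).map (fun n => (hrln, n))
    else pvLoopA rest code

def flores_code_to_hrln (code : String) : Option (String × String) :=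
  pvLoopA pvHrln2Crls code

-- ===== PORT B =====
def pvHrln2CrlsB : List (String × List String) :=
  [("hin_Deva", ["hne_Deva", "bho_Deva", "mag_Deva", "mai_Deva", "hin_Deva"]),
   ("tur_Latn", ["tur_Latn", "uzn_Latn", "tuk_Latn", "azj_Latn", "crh_Latn"]),
   ("ita_Latn", ["spa_Latn", "fra_Latn", "por_Latn", "ita_Latn", "ron_Latn", "glg_Latn", "cat_Latn", "oci_Latn", "ast_Latn", "lmo_Latn", "vec_Latn", "scn_Latn", "srd_Latn", "fur_Latn", "lij_Latn"]),
   ("ind_Latn", ["ind_Latn", "jav_Latn", "sun_Latn", "smo_Latn", "mri_Latn", "ceb_Latn", "zsm_Latn", "tgl_Latn", "ilo_Latn", "fij_Latn", "plt_Latn", "pag_Latn"]),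
   ("arb_Arab", ["arb_Arab", "acm_Arab", "acq_Arab", "aeb_Arab", "ajp_Arab", "apc_Arab", "ars_Arab", "ary_Arab", "arz_Arab", "cai", "dam", "doh", "fes", "jer", "kha", "msa", "riy", "san", "tri", "tun"])]

def pvHrlnName : PySem.Dict String String := PySem.Dict.ofList [("hin_Deva", "Hindi"), ("tur_Latn", "Turkish"), ("ita_Latn", "Italian"), ("ind_Latn", "Indonesian"), ("arb_Arab", "Arabic")]

-- _CODE2HRLN = the reverse index built by the dict comprehension
def pvCode2Hrln : PySem.Dict String String :=
  PySem.Dict.ofList (pvHrln2CrlsB.flatMap (fun p => p.2.map (fun c => (c, p.1))))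

def flores_code_to_hrln_alt (code : String) : Option (String × String) :=
  match pvCode2Hrln.get? code with
  | none => none
  | some hrln => (pvHrlnName.get? hrln).map (fun n => (hrln, n))

-- ===== PRECONDITION & SPEC =====
def Spec_flores_code_to_hrln (code : String) (out : Option (String × String)) : Prop := out = flores_code_to_hrln_alt code
instance (code : String) (out : Option (String × String)) : Decidable (Spec_flores_code_to_hrln code out) := by unfold Spec_flores_code_to_hrln; infer_instance

-- ===== CLAIM (what is proved, stated in full; the proofs are below) =====
def Claim_equal_flores_code_to_hrln : Prop := ∀ (code : String), Dom_flores_code_to_hrln code → Spec_flores_code_to_hrln code (flores_code_to_hrln code)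

-- ===== LEMMAS AND PROOFS =====
-- the reverse-index pairs, flattened to one literal association list
def pvFlat : List (String × String) := [("hne_Deva", "hin_Deva"), ("bho_Deva", "hin_Deva"), ("mag_Deva", "hin_Deva"), ("mai_Deva", "hin_Deva"), ("hin_Deva", "hin_Deva"), ("tur_Latn", "tur_Latn"), ("uzn_Latn", "tur_Latn"), ("tuk_Latn", "tur_Latn"), ("azj_Latn", "tur_Latn"), ("crh_Latn", "tur_Latn"), ("spa_Latn", "ita_Latn"), ("fra_Latn", "ita_Latn"), ("por_Latn", "ita_Latn"), ("ita_Latn", "ita_Latn"), ("ron_Latn", "ita_Latn"), ("glg_Latn", "ita_Latn"), ("cat_Latn", "ita_Latn"), ("oci_Latn", "ita_Latn"), ("ast_Latn", "ita_Latn"), ("lmo_Latn", "ita_Latn"), ("vec_Latn", "ita_Latn"), ("scn_Latn", "ita_Latn"), ("srd_Latn", "ita_Latn"), ("fur_Latn", "ita_Latn"), ("lij_Latn", "ita_Latn"), ("ind_Latn", "ind_Latn"), ("jav_Latn", "ind_Latn"), ("sun_Latn", "ind_Latn"), ("smo_Latn", "ind_Latn"), ("mri_Latn", "ind_Latn"),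 ("ceb_Latn", "ind_Latn"), ("zsm_Latn", "ind_Latn"), ("tgl_Latn", "ind_Latn"), ("ilo_Latn", "ind_Latn"), ("fij_Latn", "ind_Latn"), ("plt_Latn", "ind_Latn"), ("pag_Latn", "ind_Latn"), ("arb_Arab", "arb_Arab"), ("acm_Arab", "arb_Arab"), ("acq_Arab", "arb_Arab"), ("aeb_Arab", "arb_Arab"), ("ajp_Arab", "arb_Arab"), ("apc_Arab", "arb_Arab"), ("ars_Arab", "arb_Arab"), ("ary_Arab", "arb_Arab"), ("arz_Arab", "arb_Arab"), ("cai", "arb_Arab"), ("dam", "arb_Arab"), ("doh", "arb_Arab"), ("fes", "arb_Arab"), ("jer", "arb_Arab"), ("kha", "arb_Arab"), ("msa", "arb_Arab"), ("riy", "arb_Arab"), ("san", "arb_Arab"), ("tri", "arb_Arab"), ("tun", "arb_Arab")]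

theorem pvFlat_eq : pvHrln2Crls.flatMap (fun p => p.2.map (fun c => (c, p.1))) = pvFlat := by rfl

-- the reverse index evaluates (its 57 keys are pairwise distinct, so insertion = append)
set_option maxRecDepth 8000 in
theorem pvCode2Hrln_eq : pvCode2Hrln = PySem.Dict.mk pvFlat := by decide

-- lookup in a literal dict is first-match search of its items list
theorem pv_get?_mk_eq (L : List (String × String)) (x : String) :
    (PySem.Dict.mk L).get? x = (L.find? (fun q => q.1 == x)).map (fun q => q.2) := by
  induction L with
  | nil => rfl
  | cons p rest ih =>
    obtain ⟨k, v⟩ := p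
    rw [PySem.Dict.get?_mk_cons]
    by_cases h : (k == x) = true
    · simp [h]
    · simp [h, ih]

-- A's loop = first-match search of the flattened (code, hrln) pairs
theorem pv_find_map_none (crls : List String) (h code : String) (hmem : code ∉ crls) :
    (crls.map (fun c => (c, h))).find? (fun q => q.1 == code) = none := by
  induction crls with
  | nil => rfl
  | cons a t ih =>
    simp only [List.mem_cons, not_or] at hmem
    simp [beq_iff_eq, Ne.symm hmem.1, ih hmem.2]

theorem pv_find_map_mem (crls : List String) (h code : String) (hmem : code ∈ crls) :
    ∃ c, (crls.map (fun c => (c, h))).find? (fun q => q.1 == code) = some (c, h) := by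
  induction crls with
  | nil => cases hmem
  | cons a t ih =>
    by_cases ha : a = code
    · exact ⟨a, by simp [ha]⟩
    · have hmem' : code ∈ t := by
        rcases List.mem_cons.mp hmem with h1 | h1
        · exact absurd h1.symm ha
        · exact h1
      obtain ⟨c, hc⟩ := ih hmem'
      exact ⟨c, by simp [beq_iff_eq, ha, hc]⟩

theorem pv_loop_eq (gs : List (String × List String)) (code : String) :
    pvLoopA gs code =
      match (gs.flatMap (fun p => p.2.map (fun c => (c, p.1)))).find? (fun q => q.1 == code) with
      | none => none
      | some q => (pvFloresCodeToLangname q.2).map (fun n => (q.2, n)) := by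
  induction gs with
  | nil => rfl
  | cons g rest ih =>
    obtain ⟨h, crls⟩ := g
    simp only [pvLoopA, List.flatMap_cons, List.find?_append]
    by_cases hmem : code ∈ crls
    · obtain ⟨c, hf⟩ := pv_find_map_mem crls h code hmem
      simp [hmem, hf]
    · simp [hmem, pv_find_map_none crls h code hmem, ih]

-- the second component of any flattened pair is one of the five group keys …
set_option maxRecDepth 8000 in
theorem pv_snd_mem : ∀ q ∈ pvFlat, q.2 ∈ (["hin_Deva", "tur_Latn", "ita_Latn", "ind_Latn", "arb_Arab"] : List String) := by
  decide

-- … and on those five keys A's langname lookup agrees with B's name table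
set_option maxRecDepth 8000 in
theorem pv_name_agree : ∀ h ∈ (["hin_Deva", "tur_Latn", "ita_Latn", "ind_Latn", "arb_Arab"] : List String),
    pvFloresCodeToLangname h = pvHrlnName.get? h := by
  decide

theorem pv_main (code : String) : flores_code_to_hrln code = flores_code_to_hrln_alt code := by
  unfold flores_code_to_hrln flores_code_to_hrln_alt
  rw [pv_loop_eq, pvFlat_eq, pvCode2Hrln_eq, pv_get?_mk_eq]
  cases hfind : pvFlat.find? (fun q => q.1 == code) with
  | none => simp
  | some q =>
    have hq : q ∈ pvFlat := List.mem_of_find?_eq_some hfind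
    simp [pv_name_agree q.2 (pv_snd_mem q hq)]

-- ===== VERDICT (by name: the statement is the Claim_ definition above) =====
theorem flores_code_to_hrln_spec : Claim_equal_flores_code_to_hrln := by
  intro code _
  exact pv_main code
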